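-- pv_equiv track=rewrite | github.com/tfcc13/FEUP_FP_1Y1S | PG/P6 Lists/Orthogonal Matrix.py | is_orthogonal
-- ===== SOURCE A (Python) =====
-- def is_orthogonal(mx):
--     col = len(mx[0])
--
--     t = []
--
--     for i in range(col):
--         l =[]
--         for j in range(col):
--             total = 0
--             for k in range(col):
--                 total += mx[i][k] * mx[j][k]
--             l.append(total)
--         t.append(l)
--
--     for i in range(col):
--         for j in range(col):
--             if i == j and t[i][j] != 1:
--                 return False
--             if i != j and t[i][j] != 0:
--                 return False
--     return True
-- ===== SOURCE B (Python) =====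
-- def is_orthogonal(mx):
--     col = len(mx[0])
--     # accumulate the Gram matrix column-by-column as a sum of rank-1 outer products
--     g = [[0] * col for _ in range(col)]
--     for k in range(col):
--         c = [mx[i][k] for i in range(col)]
--         g = [[g[i][j] + c[i] * c[j] for j in range(col)] for i in range(col)]
--     return g == [[1 if i == j else 0 for j in range(col)] for i in range(col)]
-- ===== Notes on version B (the rewrite author's own statement) =====
-- stated objective: alternative
-- what changed: B computes the Gram matrix by a column-major accumulation of rank-1 outer products (for each k, extract column k and add c[i]*c[j] to every entry) instead of A's row-by-row triple loop of dot products, and decides the result by a single structural equality of the accumulated matrix with a separately built identity matrix instead of A's entry-by-entry scan with early returns.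
import Mathlib
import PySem

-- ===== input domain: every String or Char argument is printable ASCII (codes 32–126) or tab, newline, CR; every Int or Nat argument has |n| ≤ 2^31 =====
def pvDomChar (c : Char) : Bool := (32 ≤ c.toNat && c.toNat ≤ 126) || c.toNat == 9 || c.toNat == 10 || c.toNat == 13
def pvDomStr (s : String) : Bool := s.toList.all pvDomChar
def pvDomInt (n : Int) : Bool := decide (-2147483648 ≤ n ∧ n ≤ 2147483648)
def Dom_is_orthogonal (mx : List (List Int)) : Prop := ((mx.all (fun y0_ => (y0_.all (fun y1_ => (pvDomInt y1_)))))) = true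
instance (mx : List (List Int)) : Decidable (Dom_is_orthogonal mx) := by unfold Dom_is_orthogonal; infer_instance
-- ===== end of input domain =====

-- B accumulates the Gram matrix as a sum of rank-1 column outer products and compares
-- it structurally with the identity matrix, instead of A's row-dot-product triple loop
-- followed by an entry-by-entry scan (alternative algorithm, same cost).

-- ===== PORT A =====
-- A: build the full col×col Gram matrix t by row dot products, then scan it against the identity.
def is_orthogonal (mx : List (List Int)) : Bool :=
  let col := (mx.getD 0 []).length
  let t : List (List Int) :=
    (List.range col).map (fun i =>
      (List.range col).map (fun j =>
        (List.range col).foldl (fun total k =>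
          total + (mx.getD i []).getD k 0 * (mx.getD j []).getD k 0) 0))
  (List.range col).all (fun i =>
    (List.range col).all (fun j =>
      if i = j then (t.getD i []).getD j 0 == 1 else (t.getD i []).getD j 0 == 0))

-- ===== PORT B =====
-- B: fold over columns k, each step adds the outer product of column k to the accumulator g;
-- then a single structural equality with the identity matrix.
-- (the loop body is the named helper pvOuterStep, mirroring Source B's update of g)
def pvOuterStep (mx : List (List Int)) (col : Nat) (g : List (List Int)) (k : Nat) : List (List Int) :=
  let c := (List.range col).map (fun i => (mx.getD i []).getD k 0)
  (List.range col).map (fun i => (List.range col).map (fun j =>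
    (g.getD i []).getD j 0 + c.getD i 0 * c.getD j 0))

def is_orthogonal_alt (mx : List (List Int)) : Bool :=
  let col := (mx.getD 0 []).length
  let g := (List.range col).foldl (pvOuterStep mx col)
    ((List.range col).map (fun _ => (List.range col).map (fun _ => (0 : Int))))
  g == (List.range col).map (fun i => (List.range col).map (fun j =>
        if i = j then (1 : Int) else 0))

-- ===== PRECONDITION & SPEC =====
-- Pre_ excludes exactly the inputs where Python A raises IndexError: the empty matrix
-- (mx[0]) and matrices whose first col = len(mx[0]) rows are missing or shorter than col.
def Pre_is_orthogonal (mx : List (List Int)) : Prop :=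
  mx ≠ [] ∧ (mx.getD 0 []).length ≤ mx.length ∧
    ∀ i < (mx.getD 0 []).length, (mx.getD 0 []).length ≤ (mx.getD i []).length
instance (mx : List (List Int)) : Decidable (Pre_is_orthogonal mx) := by
  unfold Pre_is_orthogonal; infer_instance
def pvWitness_is_orthogonal : List (List Int) := [[1, 0], [0, -1]]
def Spec_is_orthogonal (mx : List (List Int)) (out : Bool) : Prop := out = is_orthogonal_alt mx
instance (mx : List (List Int)) (out : Bool) : Decidable (Spec_is_orthogonal mx out) := by unfold Spec_is_orthogonal; infer_instance

-- ===== CLAIM =====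
def Claim_equal_is_orthogonal : Prop := ∀ (mx : List (List Int)), Dom_is_orthogonal mx → Pre_is_orthogonal mx → Spec_is_orthogonal mx (is_orthogonal mx)

-- ===== LEMMAS AND PROOFS =====

theorem pv_all_congr {α : Type} (l : List α) (p q : α → Bool)
    (h : ∀ x ∈ l, p x = q x) : l.all p = l.all q := by
  induction l with
  | nil => rfl
  | cons a t ih =>
    simp only [List.all_cons, h a (by simp), ih (fun x hx => h x (by simp [hx]))]

-- two maps over the same list are beq-equal iff pointwise beq-equal
theorem pv_beq_map_map {α β : Type} [BEq β] [LawfulBEq β] (l : List α) (f h : α → β) :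
    ((l.map f) == (l.map h)) = l.all (fun x => f x == h x) := by
  induction l with
  | nil => rfl
  | cons a t ih =>
    simp [List.all_cons, ih]

-- one step of B's fold turns a map-map table of f into the table of f plus the outer product
theorem pv_outer_step (mx : List (List Int)) (col : Nat) (k : Nat) (f : Nat → Nat → Int) :
    pvOuterStep mx col
      ((List.range col).map (fun i => (List.range col).map (fun j => f i j))) k
    = (List.range col).map (fun i => (List.range col).map (fun j =>
        f i j + (mx.getD i []).getD k 0 * (mx.getD j []).getD k 0)) := by
  unfold pvOuterStep
  apply List.map_congr_left; intro i hi
  apply List.map_congr_left; intro j hj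
  rw [List.mem_range] at hi hj
  rw [PySem.List.getD_map_range _ _ _ _ hi, PySem.List.getD_map_range _ _ _ _ hj,
      PySem.List.getD_map_range _ _ _ _ hi, PySem.List.getD_map_range _ _ _ _ hj]

-- invariant of B's fold: starting from a map-map table of f, folding the ks produces
-- the map-map table of the per-entry partial sums over ks
theorem pv_fold_outer (mx : List (List Int)) (col : Nat) (ks : List Nat) (f : Nat → Nat → Int) :
    ks.foldl (pvOuterStep mx col)
      ((List.range col).map (fun i => (List.range col).map (fun j => f i j)))
    = (List.range col).map (fun i => (List.range col).map (fun j =>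
        ks.foldl (fun total k =>
          total + (mx.getD i []).getD k 0 * (mx.getD j []).getD k 0) (f i j))) := by
  induction ks generalizing f with
  | nil => rfl
  | cons k ks ih =>
    simp only [List.foldl_cons]
    rw [pv_outer_step, ih]

theorem is_orthogonal_spec : Claim_equal_is_orthogonal := by
  intro mx _ _
  unfold Spec_is_orthogonal is_orthogonal is_orthogonal_alt
  simp only []
  rw [show ((List.range ((mx.getD 0 []).length)).map
        (fun _ => (List.range ((mx.getD 0 []).length)).map (fun _ => (0 : Int))))
      = (List.range ((mx.getD 0 []).length)).map
        (fun i => (List.range ((mx.getD 0 []).length)).map (fun j => (fun _ _ => (0:Int)) i j)) from rfl]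
  rw [pv_fold_outer, pv_beq_map_map]
  apply pv_all_congr
  intro i hi
  rw [pv_beq_map_map]
  apply pv_all_congr
  intro j hj
  rw [List.mem_range] at hi hj
  rw [PySem.List.getD_map_range _ _ _ _ hi, PySem.List.getD_map_range _ _ _ _ hj]
  split <;> rfl

-- ===== VERDICT =====
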